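-- pv_equiv track=rewrite | github.com/parasiitism/AlgoDaily | leetcode/750-number-of-corner-retangles/main.py | maxAreaCornerRectangle
-- ===== SOURCE A (Python) =====
-- def maxAreaCornerRectangle(grid):
--     """
--     :type grid: List[List[int]]
--     :rtype: int
--     """
--     res = 0
--     for i in range(len(grid)):
--         pairs = []
--         for j in range(len(grid[0])):
--             if grid[i][j] == 1:
--                 for k in range(j+1, len(grid[0])):
--                     if grid[i][k] == 1:
--                         pairs.append((j, k))
--         for bIdx in range(len(grid)-1, i, -1):
--             row = grid[bIdx]
--             for x, y in pairs:
--                 if row[x] == 1 and row[y] == 1: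
--                     area = (y-x+1)*(bIdx-i+1)
--                     res = max(res, area)
--     return res
-- ===== SOURCE B (Python) =====
-- def maxAreaCornerRectangle(grid):
--     if not grid:
--         return 0
--     cols = len(grid[0])
--     n = len(grid)
--     ones = [[c for c in range(cols) if row[c] == 1] for row in grid]
--     res = 0
--     for i in range(n):
--         oi = ones[i]
--         if len(oi) < 2:
--             continue
--         for b in range(i + 1, n):
--             bot = grid[b]
--             lo = -1
--             hi = -1
--             for c in oi:
--                 if bot[c] == 1:
--                     if lo < 0:
--                         lo = c
--                     hi = c
--             if lo >= 0 and hi > lo: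
--                 area = (hi - lo + 1) * (b - i + 1)
--                 if area > res:
--                     res = area
--     return res
-- ===== Notes on version B (the rewrite author's own statement) =====
-- stated objective: faster
-- what changed: A enumerates all O(cols^2) column pairs of 1s per row and rechecks every pair against every lower row; B precomputes each row's 1-columns, skips rows with fewer than two 1s, and for each row pair finds the first and last common 1-column in one scan of those columns (the widest span maximises the area for that row pair).
import Mathlib
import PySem

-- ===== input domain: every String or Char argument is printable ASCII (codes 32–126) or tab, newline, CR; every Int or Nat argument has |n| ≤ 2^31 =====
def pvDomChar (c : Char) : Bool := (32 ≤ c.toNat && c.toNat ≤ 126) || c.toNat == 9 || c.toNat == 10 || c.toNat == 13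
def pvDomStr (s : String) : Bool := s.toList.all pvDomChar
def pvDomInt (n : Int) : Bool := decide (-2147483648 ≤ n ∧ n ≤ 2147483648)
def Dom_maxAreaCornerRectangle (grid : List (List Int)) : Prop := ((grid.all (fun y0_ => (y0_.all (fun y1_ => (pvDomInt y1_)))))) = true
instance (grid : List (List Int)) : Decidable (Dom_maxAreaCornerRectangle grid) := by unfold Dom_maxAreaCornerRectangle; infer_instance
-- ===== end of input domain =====

-- B replaces A's per-row-pair scan over all O(cols²) column pairs by a single O(cols) scan
-- for the first and last common 1-column (the widest span); objective: faster (asymptotic).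

-- ===== PORT A =====
-- shared access helpers: grid[r] and grid[r][c] and len(grid[0])
def pvRow (grid : List (List Int)) (r : Int) : List Int := (PySem.List.pyGet? grid r).getD []
def pvCell (grid : List (List Int)) (r c : Int) : Int := (PySem.List.pyGet? (pvRow grid r) c).getD 0
def pvCols (grid : List (List Int)) : Int := (pvRow grid 0).length

-- the `pairs` list A builds for row i: all (j,k), j<k, with grid[i][j]=grid[i][k]=1
def pvPairsA (grid : List (List Int)) (i : Int) : List (Int × Int) :=
  (PySem.List.pyRange 0 (pvCols grid)).foldl (fun ps j =>
    if pvCell grid i j = 1 then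
      (PySem.List.pyRange (j + 1) (pvCols grid)).foldl (fun ps k =>
        if pvCell grid i k = 1 then ps ++ [(j, k)] else ps) ps
    else ps) []

def maxAreaCornerRectangle (grid : List (List Int)) : Int :=
  (PySem.List.pyRange 0 (grid.length : Int)).foldl (fun res i =>
    (PySem.List.pyRange ((grid.length : Int) - 1) i (-1)).foldl (fun res bIdx =>
      (pvPairsA grid i).foldl (fun res xy =>
        if pvCell grid bIdx xy.1 = 1 ∧ pvCell grid bIdx xy.2 = 1 then
          max res ((xy.2 - xy.1 + 1) * (bIdx - i + 1))
        else res) res) res) 0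

-- ===== PORT B =====
-- the 1-columns of row r (Python: ones[r])
def pvOnes (grid : List (List Int)) (r : Int) : List Int :=
  (PySem.List.pyRange 0 (pvCols grid)).filter (fun c => decide (pvCell grid r c = 1))
-- one scan over row i's 1-columns: (first, last) column where row b also has a 1, else (-1,-1)
def pvScanB (grid : List (List Int)) (i b : Int) : Int × Int :=
  (pvOnes grid i).foldl (fun lh c =>
    if pvCell grid b c = 1 then ((if lh.1 < 0 then c else lh.1), c) else lh) (-1, -1)

def maxAreaCornerRectangle_alt (grid : List (List Int)) : Int :=
  if grid = [] then 0
  else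
    (PySem.List.pyRange 0 (grid.length : Int)).foldl (fun res i =>
      if (pvOnes grid i).length < 2 then res
      else
        (PySem.List.pyRange (i + 1) (grid.length : Int)).foldl (fun res b =>
          if 0 ≤ (pvScanB grid i b).1 ∧ (pvScanB grid i b).1 < (pvScanB grid i b).2 then
            if res < ((pvScanB grid i b).2 - (pvScanB grid i b).1 + 1) * (b - i + 1) then
              ((pvScanB grid i b).2 - (pvScanB grid i b).1 + 1) * (b - i + 1)
            else res
          else res) res) 0

-- ===== PRECONDITION & SPEC =====
-- Pre_ excludes exactly the ragged grids on which Python A raises IndexError: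
-- a nonempty grid with some row shorter than the first row.
def Pre_maxAreaCornerRectangle (grid : List (List Int)) : Prop :=
  ∀ r ∈ grid, (grid.headD []).length ≤ r.length
instance (grid : List (List Int)) : Decidable (Pre_maxAreaCornerRectangle grid) := by
  unfold Pre_maxAreaCornerRectangle; infer_instance
def pvWitness_maxAreaCornerRectangle : List (List Int) := [[1, 1], [0, 1], [1, 1]]

def Spec_maxAreaCornerRectangle (grid : List (List Int)) (out : Int) : Prop := out = maxAreaCornerRectangle_alt grid
instance (grid : List (List Int)) (out : Int) : Decidable (Spec_maxAreaCornerRectangle grid out) := by unfold Spec_maxAreaCornerRectangle; infer_instance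

-- ===== CLAIM (what is proved, stated in full; the proofs are below) =====
def Claim_equal_maxAreaCornerRectangle : Prop := ∀ (grid : List (List Int)), Dom_maxAreaCornerRectangle grid → Pre_maxAreaCornerRectangle grid → Spec_maxAreaCornerRectangle grid (maxAreaCornerRectangle grid)

-- ===== LEMMAS AND PROOFS =====

-- `v` is the area of some corner rectangle of 1s (the common value both programs maximise)
def pvArea (i b x y : Int) : Int := (y - x + 1) * (b - i + 1)

def pvPairAt (grid : List (List Int)) (i b x y : Int) : Prop :=
  0 ≤ x ∧ x < y ∧ y < pvCols grid ∧
  pvCell grid i x = 1 ∧ pvCell grid i y = 1 ∧ pvCell grid b x = 1 ∧ pvCell grid b y = 1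

def pvCand (grid : List (List Int)) (v : Int) : Prop :=
  ∃ i b x y, 0 ≤ i ∧ i < b ∧ b < (grid.length : Int) ∧ pvPairAt grid i b x y ∧ v = pvArea i b x y

def pvIsMax (grid : List (List Int)) (r : Int) : Prop :=
  0 ≤ r ∧ (r = 0 ∨ pvCand grid r) ∧ ∀ v, pvCand grid v → v ≤ r

lemma pvIsMax_unique (grid : List (List Int)) (r₁ r₂ : Int)
    (h₁ : pvIsMax grid r₁) (h₂ : pvIsMax grid r₂) : r₁ = r₂ := by
  obtain ⟨hn₁, hm₁, hu₁⟩ := h₁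
  obtain ⟨hn₂, hm₂, hu₂⟩ := h₂
  have h12 : r₁ ≤ r₂ := by
    rcases hm₁ with h | h
    · omega
    · exact hu₂ _ h
  have h21 : r₂ ≤ r₁ := by
    rcases hm₂ with h | h
    · omega
    · exact hu₁ _ h
  omega

-- generic spec of a max-accumulating fold: the result is ≥ the seed, is the seed or a value
-- produced (S) at some list element, and dominates every value attached (C) to a list element
lemma pvFoldMaxSpec {α : Type} (S C : α → Int → Prop) (step : Int → α → Int) :
    ∀ l : List α,
      (∀ a : Int, ∀ t ∈ l, a ≤ step a t) →
      (∀ a : Int, ∀ t ∈ l, step a t = a ∨ S t (step a t)) →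
      (∀ a : Int, ∀ t ∈ l, ∀ v, C t v → v ≤ step a t) →
      ∀ a : Int,
        a ≤ l.foldl step a ∧ (l.foldl step a = a ∨ ∃ t ∈ l, S t (l.foldl step a)) ∧
        (∀ t ∈ l, ∀ v, C t v → v ≤ l.foldl step a) := by
  intro l
  induction l with
  | nil => intro _ _ _ a; simp
  | cons hd tl ih =>
    intro h1 h2 h3 a
    have hmem : ∀ t ∈ tl, t ∈ hd :: tl := fun t ht => List.mem_cons_of_mem _ ht
    obtain ⟨iha, ihb, ihc⟩ := ih (fun a t ht => h1 a t (hmem t ht))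
      (fun a t ht => h2 a t (hmem t ht)) (fun a t ht => h3 a t (hmem t ht)) (step a hd)
    have hr : (hd :: tl).foldl step a = tl.foldl step (step a hd) := rfl
    refine ⟨?_, ?_, ?_⟩
    · exact le_trans (h1 a hd (List.mem_cons_self)) (hr ▸ iha)
    · rw [hr]
      rcases ihb with he | ⟨t, ht, hS⟩
      · rcases h2 a hd (List.mem_cons_self) with h | h
        · exact Or.inl (he.trans h)
        · exact Or.inr ⟨hd, List.mem_cons_self, by rw [he]; exact h⟩
      · exact Or.inr ⟨t, hmem t ht, hS⟩
    · intro t ht v hv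
      rw [hr]
      rcases List.mem_cons.mp ht with rfl | ht'
      · exact le_trans (h3 a t (List.mem_cons_self) v hv) iha
      · exact ihc t ht' v hv

-- membership in A's pairs list
lemma pvMem_pairsA (grid : List (List Int)) (i : Int) (xy : Int × Int) :
    xy ∈ pvPairsA grid i ↔
      0 ≤ xy.1 ∧ xy.1 < xy.2 ∧ xy.2 < pvCols grid ∧
      pvCell grid i xy.1 = 1 ∧ pvCell grid i xy.2 = 1 := by
  obtain ⟨x, y⟩ := xy
  have hinner : ∀ j : Int, ∀ ps : List (Int × Int),
      (PySem.List.pyRange (j + 1) (pvCols grid)).foldl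
        (fun ps k => if pvCell grid i k = 1 then ps ++ [(j, k)] else ps) ps
      = ps ++ ((PySem.List.pyRange (j + 1) (pvCols grid)).filter
          (fun k => decide (pvCell grid i k = 1))).map (fun k => (j, k)) := by
    intro j ps
    simpa using PySem.List.foldl_append_if (fun k => decide (pvCell grid i k = 1))
      (fun k => (j, k)) (PySem.List.pyRange (j + 1) (pvCols grid)) ps
  have hA : pvPairsA grid i = (PySem.List.pyRange 0 (pvCols grid)).flatMap
      (fun j => if pvCell grid i j = 1 then
        ((PySem.List.pyRange (j + 1) (pvCols grid)).filter
          (fun k => decide (pvCell grid i k = 1))).map (fun k => (j, k)) else []) := by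
    unfold pvPairsA
    have hstep : (fun (ps : List (Int × Int)) (j : Int) =>
        if pvCell grid i j = 1 then
          (PySem.List.pyRange (j + 1) (pvCols grid)).foldl
            (fun ps k => if pvCell grid i k = 1 then ps ++ [(j, k)] else ps) ps
        else ps)
      = fun ps j => ps ++ (if pvCell grid i j = 1 then
          ((PySem.List.pyRange (j + 1) (pvCols grid)).filter
            (fun k => decide (pvCell grid i k = 1))).map (fun k => (j, k)) else []) := by
      funext ps j
      by_cases h : pvCell grid i j = 1
      · simp [h, hinner]
      · simp [h]
    rw [hstep, PySem.List.foldl_append_eq_flatMap]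
    simp
  rw [hA]
  simp only [List.mem_flatMap, PySem.List.mem_pyRange_one]
  constructor
  · rintro ⟨j, ⟨hj0, hjw⟩, hmem⟩
    by_cases h : pvCell grid i j = 1
    · simp only [h, if_pos, List.mem_map, List.mem_filter, PySem.List.mem_pyRange_one] at hmem
      obtain ⟨k, ⟨⟨hk1, hk2⟩, hQ⟩, hxy⟩ := hmem
      obtain ⟨rfl, rfl⟩ := Prod.mk.injEq .. ▸ hxy
      simp only [decide_eq_true_eq] at hQ
      exact ⟨hj0, by omega, by omega, h, hQ⟩
    · simp [h] at hmem
  · rintro ⟨hx0, hxy, hyw, hcx, hcy⟩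
    refine ⟨x, ⟨hx0, by omega⟩, ?_⟩
    simp only [hcx, if_pos, List.mem_map, List.mem_filter, PySem.List.mem_pyRange_one]
    exact ⟨y, ⟨⟨by omega, hyw⟩, by simp [hcy]⟩, rfl⟩

-- scan lemma, tail phase: once lo ≥ 0 is fixed it never changes; hi ends at the last hit
lemma pvScanTail (Q : Int → Prop) [DecidablePred Q] :
    ∀ cs : List Int, cs.Pairwise (· ≤ ·) → ∀ lo hi : Int, 0 ≤ lo → (∀ c ∈ cs, hi ≤ c) →
      (cs.foldl (fun lh c => if Q c then ((if lh.1 < 0 then c else lh.1), c) else lh) (lo, hi)).1 = lo ∧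
      ((cs.foldl (fun lh c => if Q c then ((if lh.1 < 0 then c else lh.1), c) else lh) (lo, hi)).2 = hi ∨
        (Q (cs.foldl (fun lh c => if Q c then ((if lh.1 < 0 then c else lh.1), c) else lh) (lo, hi)).2 ∧
         (cs.foldl (fun lh c => if Q c then ((if lh.1 < 0 then c else lh.1), c) else lh) (lo, hi)).2 ∈ cs)) ∧
      hi ≤ (cs.foldl (fun lh c => if Q c then ((if lh.1 < 0 then c else lh.1), c) else lh) (lo, hi)).2 ∧
      (∀ c ∈ cs, Q c → c ≤ (cs.foldl (fun lh c => if Q c then ((if lh.1 < 0 then c else lh.1), c) else lh) (lo, hi)).2) := by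
  intro cs
  induction cs with
  | nil => intro _ lo hi _ _; simp
  | cons c cs ih =>
    intro hpw lo hi hlo hhi
    have hpw' := (List.pairwise_cons.mp hpw).2
    have hcle := (List.pairwise_cons.mp hpw).1
    by_cases hQ : Q c
    · have hstate : (fun lh (c : Int) => if Q c then ((if (lh : Int × Int).1 < 0 then c else lh.1), c) else lh) (lo, hi) c = (lo, c) := by
        simp [hQ]; omega
      have hfold : ((c :: cs).foldl (fun lh c => if Q c then ((if lh.1 < 0 then c else lh.1), c) else lh) (lo, hi))
          = cs.foldl (fun lh c => if Q c then ((if lh.1 < 0 then c else lh.1), c) else lh) (lo, c) := by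
        simp [List.foldl_cons, hstate]
      obtain ⟨ih1, ih2, ih3, ih4⟩ := ih hpw' lo c hlo hcle
      rw [hfold]
      refine ⟨ih1, ?_, le_trans (hhi c List.mem_cons_self) ih3, ?_⟩
      · rcases ih2 with h | ⟨h1, h2⟩
        · exact Or.inr ⟨by rw [h]; exact hQ, by rw [h]; exact List.mem_cons_self⟩
        · exact Or.inr ⟨h1, List.mem_cons_of_mem _ h2⟩
      · intro c' hc' hQ'
        rcases List.mem_cons.mp hc' with rfl | h
        · exact ih3
        · exact ih4 c' h hQ'
    · have hfold : ((c :: cs).foldl (fun lh c => if Q c then ((if lh.1 < 0 then c else lh.1), c) else lh) (lo, hi))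
          = cs.foldl (fun lh c => if Q c then ((if lh.1 < 0 then c else lh.1), c) else lh) (lo, hi) := by
        simp [List.foldl_cons, hQ]
      have hhi' : ∀ c' ∈ cs, hi ≤ c' := fun c' h => hhi c' (List.mem_cons_of_mem _ h)
      obtain ⟨ih1, ih2, ih3, ih4⟩ := ih hpw' lo hi hlo hhi'
      rw [hfold]
      refine ⟨ih1, ?_, ih3, ?_⟩
      · rcases ih2 with h | ⟨h1, h2⟩
        · exact Or.inl h
        · exact Or.inr ⟨h1, List.mem_cons_of_mem _ h2⟩
      · intro c' hc' hQ'
        rcases List.mem_cons.mp hc' with rfl | h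
        · exact absurd hQ' hQ
        · exact ih4 c' h hQ'

-- scan lemma: from (-1,-1), either no column satisfies Q, or (lo,hi) brackets exactly the Q-columns
lemma pvScanMain (Q : Int → Prop) [DecidablePred Q] :
    ∀ cs : List Int, cs.Pairwise (· ≤ ·) → (∀ c ∈ cs, 0 ≤ c) →
      ((cs.foldl (fun lh c => if Q c then ((if lh.1 < 0 then c else lh.1), c) else lh) (-1, -1)) = (-1, -1) ∧ ∀ c ∈ cs, ¬ Q c) ∨
      (0 ≤ (cs.foldl (fun lh c => if Q c then ((if lh.1 < 0 then c else lh.1), c) else lh) (-1, -1)).1 ∧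
       Q (cs.foldl (fun lh c => if Q c then ((if lh.1 < 0 then c else lh.1), c) else lh) (-1, -1)).1 ∧
       (cs.foldl (fun lh c => if Q c then ((if lh.1 < 0 then c else lh.1), c) else lh) (-1, -1)).1 ∈ cs ∧
       Q (cs.foldl (fun lh c => if Q c then ((if lh.1 < 0 then c else lh.1), c) else lh) (-1, -1)).2 ∧
       (cs.foldl (fun lh c => if Q c then ((if lh.1 < 0 then c else lh.1), c) else lh) (-1, -1)).2 ∈ cs ∧
       (cs.foldl (fun lh c => if Q c then ((if lh.1 < 0 then c else lh.1), c) else lh) (-1, -1)).1 ≤ (cs.foldl (fun lh c => if Q c then ((if lh.1 < 0 then c else lh.1), c) else lh) (-1, -1)).2 ∧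
       (∀ c ∈ cs, Q c → (cs.foldl (fun lh c => if Q c then ((if lh.1 < 0 then c else lh.1), c) else lh) (-1, -1)).1 ≤ c ∧ c ≤ (cs.foldl (fun lh c => if Q c then ((if lh.1 < 0 then c else lh.1), c) else lh) (-1, -1)).2)) := by
  intro cs
  induction cs with
  | nil => intro _ _; left; simp
  | cons c cs ih =>
    intro hpw h0
    have hpw' := (List.pairwise_cons.mp hpw).2
    have hcle := (List.pairwise_cons.mp hpw).1
    by_cases hQ : Q c
    · right
      have hc0 : (0 : Int) ≤ c := h0 c List.mem_cons_self
      have hfold : ((c :: cs).foldl (fun lh c => if Q c then ((if lh.1 < 0 then c else lh.1), c) else lh) ((-1 : Int), (-1 : Int)))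
          = cs.foldl (fun lh c => if Q c then ((if lh.1 < 0 then c else lh.1), c) else lh) (c, c) := by
        simp [List.foldl_cons, hQ]
      obtain ⟨t1, t2, t3, t4⟩ := pvScanTail Q cs hpw' c c hc0 hcle
      rw [hfold]
      refine ⟨by omega, by rw [t1]; exact hQ, by rw [t1]; exact List.mem_cons_self, ?_, ?_, by omega, ?_⟩
      · rcases t2 with h | ⟨h1, _⟩
        · rw [h]; exact hQ
        · exact h1
      · rcases t2 with h | ⟨_, h2⟩
        · rw [h]; exact List.mem_cons_self
        · exact List.mem_cons_of_mem _ h2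
      · intro c' hc' hQ'
        rcases List.mem_cons.mp hc' with rfl | h
        · exact ⟨by omega, t3⟩
        · exact ⟨by rw [t1]; exact hcle c' h, t4 c' h hQ'⟩
    · have hfold : ((c :: cs).foldl (fun lh c => if Q c then ((if lh.1 < 0 then c else lh.1), c) else lh) ((-1 : Int), (-1 : Int)))
          = cs.foldl (fun lh c => if Q c then ((if lh.1 < 0 then c else lh.1), c) else lh) (-1, -1) := by
        simp [List.foldl_cons, hQ]
      have h0' : ∀ c' ∈ cs, (0 : Int) ≤ c' := fun c' h => h0 c' (List.mem_cons_of_mem _ h)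
      rw [hfold]
      rcases ih hpw' h0' with ⟨h1, h2⟩ | ⟨h1, h2, h3, h4, h5, h6, h7⟩
      · left
        refine ⟨h1, ?_⟩
        intro c' hc'
        rcases List.mem_cons.mp hc' with rfl | h
        · exact hQ
        · exact h2 c' h
      · right
        refine ⟨h1, h2, List.mem_cons_of_mem _ h3, h4, List.mem_cons_of_mem _ h5, h6, ?_⟩
        intro c' hc' hQ'
        rcases List.mem_cons.mp hc' with rfl | h
        · exact absurd hQ' hQ
        · exact h7 c' h hQ'

lemma pvPortA_isMax (grid : List (List Int)) : pvIsMax grid (maxAreaCornerRectangle grid) := by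
  -- spec of the innermost fold over `pairs`, for fixed i, bIdx
  have spec3 : ∀ i b : Int, ∀ a : Int,
      a ≤ (pvPairsA grid i).foldl (fun res xy =>
            if pvCell grid b xy.1 = 1 ∧ pvCell grid b xy.2 = 1 then
              max res ((xy.2 - xy.1 + 1) * (b - i + 1)) else res) a ∧
      ((pvPairsA grid i).foldl (fun res xy =>
            if pvCell grid b xy.1 = 1 ∧ pvCell grid b xy.2 = 1 then
              max res ((xy.2 - xy.1 + 1) * (b - i + 1)) else res) a = a ∨
        ∃ x y, pvPairAt grid i b x y ∧
          (pvPairsA grid i).foldl (fun res xy =>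
            if pvCell grid b xy.1 = 1 ∧ pvCell grid b xy.2 = 1 then
              max res ((xy.2 - xy.1 + 1) * (b - i + 1)) else res) a = pvArea i b x y) ∧
      (∀ v, (∃ x y, pvPairAt grid i b x y ∧ v = pvArea i b x y) →
        v ≤ (pvPairsA grid i).foldl (fun res xy =>
            if pvCell grid b xy.1 = 1 ∧ pvCell grid b xy.2 = 1 then
              max res ((xy.2 - xy.1 + 1) * (b - i + 1)) else res) a) := by
    intro i b a
    obtain ⟨g1, g2, g3⟩ := pvFoldMaxSpec
      (S := fun xy v => pvCell grid b xy.1 = 1 ∧ pvCell grid b xy.2 = 1 ∧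
        v = (xy.2 - xy.1 + 1) * (b - i + 1))
      (C := fun xy v => pvCell grid b xy.1 = 1 ∧ pvCell grid b xy.2 = 1 ∧
        v = (xy.2 - xy.1 + 1) * (b - i + 1))
      (step := fun res xy => if pvCell grid b xy.1 = 1 ∧ pvCell grid b xy.2 = 1 then
          max res ((xy.2 - xy.1 + 1) * (b - i + 1)) else res)
      (pvPairsA grid i)
      (by intro a t _
          beta_reduce
          by_cases h : pvCell grid b t.1 = 1 ∧ pvCell grid b t.2 = 1
          · rw [if_pos h]; exact le_max_left _ _
          · rw [if_neg h])
      (by intro a t _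
          beta_reduce
          by_cases h : pvCell grid b t.1 = 1 ∧ pvCell grid b t.2 = 1
          · rw [if_pos h]
            rcases max_choice a ((t.2 - t.1 + 1) * (b - i + 1)) with hm | hm
            · exact Or.inl hm
            · exact Or.inr ⟨h.1, h.2, hm⟩
          · rw [if_neg h]; exact Or.inl rfl)
      (by rintro a t _ v ⟨hv1, hv2, hv3⟩
          beta_reduce
          rw [if_pos ⟨hv1, hv2⟩, hv3]
          exact le_max_right _ _)
      a
    refine ⟨g1, ?_, ?_⟩
    · rcases g2 with h | ⟨xy, hmem, hS1, hS2, hS3⟩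
      · exact Or.inl h
      · obtain ⟨m1, m2, m3, m4, m5⟩ := (pvMem_pairsA grid i xy).mp hmem
        exact Or.inr ⟨xy.1, xy.2, ⟨m1, m2, m3, m4, m5, hS1, hS2⟩, hS3⟩
    · rintro v ⟨x, y, ⟨p1, p2, p3, p4, p5, p6, p7⟩, rfl⟩
      exact g3 (x, y) ((pvMem_pairsA grid i (x, y)).mpr ⟨p1, p2, p3, p4, p5⟩) _ ⟨p6, p7, rfl⟩
  -- spec of the fold over bIdx, for fixed i
  have spec2 : ∀ i : Int, ∀ a : Int,
      a ≤ (PySem.List.pyRange ((grid.length : Int) - 1) i (-1)).foldl (fun res bIdx =>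
            (pvPairsA grid i).foldl (fun res xy =>
              if pvCell grid bIdx xy.1 = 1 ∧ pvCell grid bIdx xy.2 = 1 then
                max res ((xy.2 - xy.1 + 1) * (bIdx - i + 1)) else res) res) a ∧
      ((PySem.List.pyRange ((grid.length : Int) - 1) i (-1)).foldl (fun res bIdx =>
            (pvPairsA grid i).foldl (fun res xy =>
              if pvCell grid bIdx xy.1 = 1 ∧ pvCell grid bIdx xy.2 = 1 then
                max res ((xy.2 - xy.1 + 1) * (bIdx - i + 1)) else res) res) a = a ∨
        ∃ b, i < b ∧ b < (grid.length : Int) ∧ ∃ x y, pvPairAt grid i b x y ∧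
          (PySem.List.pyRange ((grid.length : Int) - 1) i (-1)).foldl (fun res bIdx =>
            (pvPairsA grid i).foldl (fun res xy =>
              if pvCell grid bIdx xy.1 = 1 ∧ pvCell grid bIdx xy.2 = 1 then
                max res ((xy.2 - xy.1 + 1) * (bIdx - i + 1)) else res) res) a = pvArea i b x y) ∧
      (∀ b, i < b → b < (grid.length : Int) → ∀ v, (∃ x y, pvPairAt grid i b x y ∧ v = pvArea i b x y) →
        v ≤ (PySem.List.pyRange ((grid.length : Int) - 1) i (-1)).foldl (fun res bIdx =>
            (pvPairsA grid i).foldl (fun res xy =>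
              if pvCell grid bIdx xy.1 = 1 ∧ pvCell grid bIdx xy.2 = 1 then
                max res ((xy.2 - xy.1 + 1) * (bIdx - i + 1)) else res) res) a) := by
    intro i a
    obtain ⟨g1, g2, g3⟩ := pvFoldMaxSpec
      (S := fun b v => ∃ x y, pvPairAt grid i b x y ∧ v = pvArea i b x y)
      (C := fun b v => ∃ x y, pvPairAt grid i b x y ∧ v = pvArea i b x y)
      (step := fun res bIdx => (pvPairsA grid i).foldl (fun res xy =>
          if pvCell grid bIdx xy.1 = 1 ∧ pvCell grid bIdx xy.2 = 1 then
            max res ((xy.2 - xy.1 + 1) * (bIdx - i + 1)) else res) res)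
      (PySem.List.pyRange ((grid.length : Int) - 1) i (-1))
      (by intro a t _; exact (spec3 i t a).1)
      (by intro a t _; exact (spec3 i t a).2.1)
      (by intro a t _ v hv; exact (spec3 i t a).2.2 v hv)
      a
    refine ⟨g1, ?_, ?_⟩
    · rcases g2 with h | ⟨b, hmem, hS⟩
      · exact Or.inl h
      · have hb := PySem.List.mem_pyRange_neg_one.mp hmem
        exact Or.inr ⟨b, hb.1, by omega, hS⟩
    · intro b hib hbn v hv
      exact g3 b (PySem.List.mem_pyRange_neg_one.mpr ⟨hib, by omega⟩) v hv
  -- outer fold over i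
  obtain ⟨g1, g2, g3⟩ := pvFoldMaxSpec
    (S := fun i v => ∃ b, i < b ∧ b < (grid.length : Int) ∧
      ∃ x y, pvPairAt grid i b x y ∧ v = pvArea i b x y)
    (C := fun i v => ∃ b, i < b ∧ b < (grid.length : Int) ∧
      ∃ x y, pvPairAt grid i b x y ∧ v = pvArea i b x y)
    (step := fun res i => (PySem.List.pyRange ((grid.length : Int) - 1) i (-1)).foldl (fun res bIdx =>
        (pvPairsA grid i).foldl (fun res xy =>
          if pvCell grid bIdx xy.1 = 1 ∧ pvCell grid bIdx xy.2 = 1 then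
            max res ((xy.2 - xy.1 + 1) * (bIdx - i + 1)) else res) res) res)
    (PySem.List.pyRange 0 (grid.length : Int))
    (by intro a t _; exact (spec2 t a).1)
    (by intro a t _
        rcases (spec2 t a).2.1 with h | ⟨b, h1, h2, hS⟩
        · exact Or.inl h
        · exact Or.inr ⟨b, h1, h2, hS⟩)
    (by rintro a t _ v ⟨b, h1, h2, hv⟩; exact (spec2 t a).2.2 b h1 h2 v hv)
    0
  refine ⟨g1, ?_, ?_⟩
  · rcases g2 with h | ⟨i, hmem, b, h1, h2, x, y, hP, hval⟩
    · exact Or.inl h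
    · have hi := PySem.List.mem_pyRange_one.mp hmem
      exact Or.inr ⟨i, b, x, y, hi.1, h1, h2, hP, hval⟩
  · rintro v ⟨i, b, x, y, hi0, hib, hbn, hP, rfl⟩
    exact g3 i (PySem.List.mem_pyRange_one.mpr ⟨hi0, by omega⟩) _ ⟨b, hib, hbn, x, y, hP, rfl⟩

lemma pvTwoMem (l : List Int) (x y : Int) (hx : x ∈ l) (hy : y ∈ l) (hxy : x < y) :
    2 ≤ l.length := by
  match l with
  | [] => simp at hx
  | [a] =>
    simp at hx hy
    omega
  | a :: b :: t => simp

lemma pvPortB_isMax (grid : List (List Int)) : pvIsMax grid (maxAreaCornerRectangle_alt grid) := by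
  by_cases hg : grid = []
  · subst hg
    refine ⟨le_rfl, Or.inl rfl, ?_⟩
    rintro v ⟨i, b, x, y, hi0, hib, hbn, _, _⟩
    simp at hbn
    omega
  · unfold maxAreaCornerRectangle_alt
    rw [if_neg hg]
    have hmemOnes : ∀ r c : Int, c ∈ pvOnes grid r ↔
        (0 ≤ c ∧ c < pvCols grid) ∧ pvCell grid r c = 1 := by
      intro r c
      simp [pvOnes, List.mem_filter, PySem.List.mem_pyRange_one]
    have hpw : ∀ r : Int, (pvOnes grid r).Pairwise (· ≤ ·) := fun r =>
      ((PySem.List.pairwise_lt_pyRange_one 0 (pvCols grid)).filter _).imp (fun h => le_of_lt h)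
    have h0 : ∀ r : Int, ∀ c ∈ pvOnes grid r, (0 : Int) ≤ c :=
      fun r c hc => ((hmemOnes r c).mp hc).1.1
    have scan : ∀ i b : Int,
        (pvScanB grid i b = (-1, -1) ∧ ∀ c ∈ pvOnes grid i, ¬ pvCell grid b c = 1) ∨
        (0 ≤ (pvScanB grid i b).1 ∧
         pvCell grid b (pvScanB grid i b).1 = 1 ∧
         (pvScanB grid i b).1 ∈ pvOnes grid i ∧
         pvCell grid b (pvScanB grid i b).2 = 1 ∧
         (pvScanB grid i b).2 ∈ pvOnes grid i ∧
         (pvScanB grid i b).1 ≤ (pvScanB grid i b).2 ∧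
         (∀ c ∈ pvOnes grid i, pvCell grid b c = 1 →
            (pvScanB grid i b).1 ≤ c ∧ c ≤ (pvScanB grid i b).2)) :=
      fun i b => pvScanMain (fun c => pvCell grid b c = 1) (pvOnes grid i) (hpw i) (h0 i)
    have spec2 : ∀ i : Int, ∀ a : Int,
        a ≤ (PySem.List.pyRange (i + 1) (grid.length : Int)).foldl (fun res b =>
              if 0 ≤ (pvScanB grid i b).1 ∧ (pvScanB grid i b).1 < (pvScanB grid i b).2 then
                if res < ((pvScanB grid i b).2 - (pvScanB grid i b).1 + 1) * (b - i + 1) then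
                  ((pvScanB grid i b).2 - (pvScanB grid i b).1 + 1) * (b - i + 1)
                else res
              else res) a ∧
        ((PySem.List.pyRange (i + 1) (grid.length : Int)).foldl (fun res b =>
              if 0 ≤ (pvScanB grid i b).1 ∧ (pvScanB grid i b).1 < (pvScanB grid i b).2 then
                if res < ((pvScanB grid i b).2 - (pvScanB grid i b).1 + 1) * (b - i + 1) then
                  ((pvScanB grid i b).2 - (pvScanB grid i b).1 + 1) * (b - i + 1)
                else res
              else res) a = a ∨
          ∃ b, i < b ∧ b < (grid.length : Int) ∧ ∃ x y, pvPairAt grid i b x y ∧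
            (PySem.List.pyRange (i + 1) (grid.length : Int)).foldl (fun res b =>
              if 0 ≤ (pvScanB grid i b).1 ∧ (pvScanB grid i b).1 < (pvScanB grid i b).2 then
                if res < ((pvScanB grid i b).2 - (pvScanB grid i b).1 + 1) * (b - i + 1) then
                  ((pvScanB grid i b).2 - (pvScanB grid i b).1 + 1) * (b - i + 1)
                else res
              else res) a = pvArea i b x y) ∧
        (∀ b, i < b → b < (grid.length : Int) → ∀ v, (∃ x y, pvPairAt grid i b x y ∧ v = pvArea i b x y) →
          v ≤ (PySem.List.pyRange (i + 1) (grid.length : Int)).foldl (fun res b =>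
              if 0 ≤ (pvScanB grid i b).1 ∧ (pvScanB grid i b).1 < (pvScanB grid i b).2 then
                if res < ((pvScanB grid i b).2 - (pvScanB grid i b).1 + 1) * (b - i + 1) then
                  ((pvScanB grid i b).2 - (pvScanB grid i b).1 + 1) * (b - i + 1)
                else res
              else res) a) := by
      intro i a
      obtain ⟨g1, g2, g3⟩ := pvFoldMaxSpec
        (S := fun b v => ∃ x y, pvPairAt grid i b x y ∧ v = pvArea i b x y)
        (C := fun b v => ∃ x y, pvPairAt grid i b x y ∧ v = pvArea i b x y)
        (step := fun res b =>
          if 0 ≤ (pvScanB grid i b).1 ∧ (pvScanB grid i b).1 < (pvScanB grid i b).2 then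
            if res < ((pvScanB grid i b).2 - (pvScanB grid i b).1 + 1) * (b - i + 1) then
              ((pvScanB grid i b).2 - (pvScanB grid i b).1 + 1) * (b - i + 1)
            else res
          else res)
        (PySem.List.pyRange (i + 1) (grid.length : Int))
        (by intro a t _
            beta_reduce
            by_cases hgd : 0 ≤ (pvScanB grid i t).1 ∧ (pvScanB grid i t).1 < (pvScanB grid i t).2
            · rw [if_pos hgd]
              by_cases hlt : a < ((pvScanB grid i t).2 - (pvScanB grid i t).1 + 1) * (t - i + 1)
              · rw [if_pos hlt]; exact le_of_lt hlt
              · rw [if_neg hlt]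
            · rw [if_neg hgd])
        (by intro a t _
            beta_reduce
            by_cases hgd : 0 ≤ (pvScanB grid i t).1 ∧ (pvScanB grid i t).1 < (pvScanB grid i t).2
            · rw [if_pos hgd]
              rcases scan i t with ⟨heq, _⟩ | ⟨h1, h2, h3, h4, h5, h6, h7⟩
              · rw [heq] at hgd; simp at hgd
              · by_cases hlt : a < ((pvScanB grid i t).2 - (pvScanB grid i t).1 + 1) * (t - i + 1)
                · rw [if_pos hlt]
                  refine Or.inr ⟨(pvScanB grid i t).1, (pvScanB grid i t).2,
                    ⟨h1, hgd.2, ((hmemOnes i _).mp h5).1.2,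
                     ((hmemOnes i _).mp h3).2, ((hmemOnes i _).mp h5).2, h2, h4⟩, rfl⟩
                · rw [if_neg hlt]; exact Or.inl rfl
            · rw [if_neg hgd]; exact Or.inl rfl)
        (by rintro a t ht v ⟨x, y, ⟨p1, p2, p3, p4, p5, p6, p7⟩, rfl⟩
            beta_reduce
            have hit : i < t := by have := PySem.List.mem_pyRange_one.mp ht; omega
            have hxm : x ∈ pvOnes grid i := (hmemOnes i x).mpr ⟨⟨p1, by omega⟩, p4⟩
            have hym : y ∈ pvOnes grid i := (hmemOnes i y).mpr ⟨⟨by omega, p3⟩, p5⟩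
            rcases scan i t with ⟨_, hnone⟩ | ⟨h1, h2, h3, h4, h5, h6, h7⟩
            · exact absurd p6 (hnone x hxm)
            · obtain ⟨hlox, hxhi⟩ := h7 x hxm p6
              obtain ⟨hloy, hyhi⟩ := h7 y hym p7
              have hgd : 0 ≤ (pvScanB grid i t).1 ∧ (pvScanB grid i t).1 < (pvScanB grid i t).2 :=
                ⟨h1, by omega⟩
              rw [if_pos hgd]
              have harea : pvArea i t x y ≤
                  ((pvScanB grid i t).2 - (pvScanB grid i t).1 + 1) * (t - i + 1) := by
                unfold pvArea
                exact mul_le_mul_of_nonneg_right (by omega) (by omega)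
              by_cases hlt : a < ((pvScanB grid i t).2 - (pvScanB grid i t).1 + 1) * (t - i + 1)
              · rw [if_pos hlt]; exact harea
              · rw [if_neg hlt]; exact le_trans harea (not_lt.mp hlt))
        a
      refine ⟨g1, ?_, ?_⟩
      · rcases g2 with h | ⟨b, hmem, hS⟩
        · exact Or.inl h
        · have hb := PySem.List.mem_pyRange_one.mp hmem
          exact Or.inr ⟨b, by omega, hb.2, hS⟩
      · intro b hib hbn v hv
        exact g3 b (PySem.List.mem_pyRange_one.mpr ⟨by omega, hbn⟩) v hv
    obtain ⟨g1, g2, g3⟩ := pvFoldMaxSpec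
      (S := fun i v => ∃ b, i < b ∧ b < (grid.length : Int) ∧
        ∃ x y, pvPairAt grid i b x y ∧ v = pvArea i b x y)
      (C := fun i v => ∃ b, i < b ∧ b < (grid.length : Int) ∧
        ∃ x y, pvPairAt grid i b x y ∧ v = pvArea i b x y)
      (step := fun res i =>
        if (pvOnes grid i).length < 2 then res
        else
          (PySem.List.pyRange (i + 1) (grid.length : Int)).foldl (fun res b =>
            if 0 ≤ (pvScanB grid i b).1 ∧ (pvScanB grid i b).1 < (pvScanB grid i b).2 then
              if res < ((pvScanB grid i b).2 - (pvScanB grid i b).1 + 1) * (b - i + 1) then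
                ((pvScanB grid i b).2 - (pvScanB grid i b).1 + 1) * (b - i + 1)
              else res
            else res) res)
      (PySem.List.pyRange 0 (grid.length : Int))
      (by intro a t _
          beta_reduce
          by_cases hsk : (pvOnes grid t).length < 2
          · rw [if_pos hsk]
          · rw [if_neg hsk]; exact (spec2 t a).1)
      (by intro a t _
          beta_reduce
          by_cases hsk : (pvOnes grid t).length < 2
          · rw [if_pos hsk]; exact Or.inl rfl
          · rw [if_neg hsk]
            rcases (spec2 t a).2.1 with h | ⟨b, h1, h2, hS⟩
            · exact Or.inl h
            · exact Or.inr ⟨b, h1, h2, hS⟩)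
      (by rintro a t _ v ⟨b, h1, h2, x, y, hP, hv⟩
          beta_reduce
          obtain ⟨p1, p2, p3, p4, p5, p6, p7⟩ := hP
          have hxm : x ∈ pvOnes grid t := (hmemOnes t x).mpr ⟨⟨p1, by omega⟩, p4⟩
          have hym : y ∈ pvOnes grid t := (hmemOnes t y).mpr ⟨⟨by omega, p3⟩, p5⟩
          have hsk : ¬ (pvOnes grid t).length < 2 := by
            have := pvTwoMem (pvOnes grid t) x y hxm hym p2
            omega
          rw [if_neg hsk]
          exact (spec2 t a).2.2 b h1 h2 v ⟨x, y, ⟨p1, p2, p3, p4, p5, p6, p7⟩, hv⟩)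
      0
    refine ⟨g1, ?_, ?_⟩
    · rcases g2 with h | ⟨i, hmem, b, h1, h2, x, y, hP, hval⟩
      · exact Or.inl h
      · have hi := PySem.List.mem_pyRange_one.mp hmem
        exact Or.inr ⟨i, b, x, y, hi.1, h1, h2, hP, hval⟩
    · rintro v ⟨i, b, x, y, hi0, hib, hbn, hP, rfl⟩
      exact g3 i (PySem.List.mem_pyRange_one.mpr ⟨hi0, by omega⟩) _ ⟨b, hib, hbn, x, y, hP, rfl⟩

lemma pvMain (grid : List (List Int)) : maxAreaCornerRectangle grid = maxAreaCornerRectangle_alt grid :=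
  pvIsMax_unique grid _ _ (pvPortA_isMax grid) (pvPortB_isMax grid)

-- ===== VERDICT (by name: the statement is the Claim_ definition above) =====
theorem maxAreaCornerRectangle_spec : Claim_equal_maxAreaCornerRectangle := by
  intro grid _ _
  exact pvMain grid
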